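-- pv_equiv track=rewrite | github.com/wmclt/Pairing | pairing.py | _find_minimum_pairs
-- ===== SOURCE A (Python) =====
-- def _find_minimum_pairs(history, pairs_with_dev):
--     minimum = 999999
--     minimum_pairs = []
--     for pair in pairs_with_dev:
--         if history[pair] < minimum:
--             minimum = history[pair]
--             minimum_pairs = [pair]
--         elif history[pair] == minimum:
--             minimum_pairs.append(pair)
--         else:
--             pass
--     return minimum_pairs
-- ===== SOURCE B (Python) =====
-- def _find_minimum_pairs(history, pairs_with_dev):
--     pairs = list(pairs_with_dev)
--     minimum = min([history[p] for p in pairs] + [999999])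
--     return [p for p in pairs if history[p] == minimum]
-- ===== Notes on version B (the rewrite author's own statement) =====
-- stated objective: simpler
-- what changed: Replaces A's single running-minimum loop with reset-on-new-minimum by a two-pass compute-then-filter: take min of all history values plus the 999999 sentinel, then keep the pairs whose value equals it.
import Mathlib
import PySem

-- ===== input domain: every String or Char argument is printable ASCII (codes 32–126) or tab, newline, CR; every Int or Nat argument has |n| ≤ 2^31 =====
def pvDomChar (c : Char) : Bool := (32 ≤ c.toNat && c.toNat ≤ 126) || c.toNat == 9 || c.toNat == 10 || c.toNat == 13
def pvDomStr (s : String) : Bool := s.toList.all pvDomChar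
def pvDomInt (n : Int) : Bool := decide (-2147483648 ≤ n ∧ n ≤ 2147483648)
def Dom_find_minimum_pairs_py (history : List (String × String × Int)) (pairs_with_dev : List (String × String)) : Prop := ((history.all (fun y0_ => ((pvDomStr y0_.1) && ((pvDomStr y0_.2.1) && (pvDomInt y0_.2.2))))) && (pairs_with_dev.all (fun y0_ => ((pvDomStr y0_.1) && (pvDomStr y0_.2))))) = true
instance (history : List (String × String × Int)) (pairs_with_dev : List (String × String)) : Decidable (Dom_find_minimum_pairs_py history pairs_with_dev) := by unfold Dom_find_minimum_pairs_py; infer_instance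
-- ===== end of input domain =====

-- B replaces A's running-minimum-with-reset loop by a compute-then-filter decomposition (same O(n) cost, simpler).

-- dict access history[pair] (first matching key); the default 0 is never reached under Pre_ (KeyError is excluded there)
def pvHGet (history : List (String × String × Int)) (p : String × String) : Int :=
  (((history.find? (fun e => e.1 == p.1 && e.2.1 == p.2)).map (fun e => e.2.2))).getD 0

-- ===== PORT A =====
def find_minimum_pairs_py (history : List (String × String × Int)) (pairs_with_dev : List (String × String)) : List (String × String) :=
  (pairs_with_dev.foldl
    (fun (st : Int × List (String × String)) pair =>
      if pvHGet history pair < st.1 then (pvHGet history pair, [pair])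
      else if pvHGet history pair = st.1 then (st.1, st.2 ++ [pair])
      else st)
    (999999, [])).2

-- ===== PORT B =====
def find_minimum_pairs_py_alt (history : List (String × String × Int)) (pairs_with_dev : List (String × String)) : List (String × String) :=
  let minimum := ((pairs_with_dev.map (fun p => pvHGet history p))).foldl min 999999
  pairs_with_dev.filter (fun p => pvHGet history p == minimum)

-- ===== PRECONDITION & SPEC =====
-- Pre_ excludes exactly the inputs where Python A raises KeyError: some pair is not a key of history.
def Pre_find_minimum_pairs_py (history : List (String × String × Int)) (pairs_with_dev : List (String × String)) : Prop :=
  ∀ p ∈ pairs_with_dev, ∃ e ∈ history, e.1 = p.1 ∧ e.2.1 = p.2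
instance (history : List (String × String × Int)) (pairs_with_dev : List (String × String)) : Decidable (Pre_find_minimum_pairs_py history pairs_with_dev) := by unfold Pre_find_minimum_pairs_py; infer_instance
def pvWitness_find_minimum_pairs_py : (List (String × String × Int)) × (List (String × String)) :=
  ([("a", "b", 3), ("c", "d", 3)], [("a", "b"), ("c", "d"), ("a", "b")])
def Spec_find_minimum_pairs_py (history : List (String × String × Int)) (pairs_with_dev : List (String × String)) (out : List (String × String)) : Prop := out = find_minimum_pairs_py_alt history pairs_with_dev
instance (history : List (String × String × Int)) (pairs_with_dev : List (String × String)) (out : List (String × String)) : Decidable (Spec_find_minimum_pairs_py history pairs_with_dev out) := by unfold Spec_find_minimum_pairs_py; infer_instance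

-- ===== CLAIM (what is proved, stated in full; the proofs are below) =====
def Claim_equal_find_minimum_pairs_py : Prop := ∀ (history : List (String × String × Int)) (pairs_with_dev : List (String × String)), Dom_find_minimum_pairs_py history pairs_with_dev → Pre_find_minimum_pairs_py history pairs_with_dev → Spec_find_minimum_pairs_py history pairs_with_dev (find_minimum_pairs_py history pairs_with_dev)

-- ===== LEMMAS AND PROOFS =====

theorem foldl_min_le (l : List Int) (a : Int) : l.foldl min a ≤ a := by
  induction l generalizing a with
  | nil => simp
  | cons x l ih => exact le_trans (ih (min a x)) (min_le_left a x)

-- characterisation of A's loop from an arbitrary state (m, ps)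
theorem fmp_loop (history : List (String × String × Int)) (l : List (String × String))
    (m : Int) (ps : List (String × String)) :
    l.foldl
      (fun (st : Int × List (String × String)) pair =>
        if pvHGet history pair < st.1 then (pvHGet history pair, [pair])
        else if pvHGet history pair = st.1 then (st.1, st.2 ++ [pair])
        else st)
      (m, ps)
    = ((l.map (fun p => pvHGet history p)).foldl min m,
       (if (l.map (fun p => pvHGet history p)).foldl min m = m then ps else [])
         ++ l.filter (fun p => pvHGet history p == (l.map (fun p => pvHGet history p)).foldl min m)) := by
  induction l generalizing m ps with
  | nil => simp
  | cons p l ih =>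
    simp only [List.foldl_cons, List.map_cons, List.filter_cons]
    by_cases h1 : pvHGet history p < m
    · rw [if_pos h1, ih]
      have hmin : min m (pvHGet history p) = pvHGet history p := by omega
      have hle : (l.map (fun p => pvHGet history p)).foldl min (pvHGet history p) ≤ pvHGet history p :=
        foldl_min_le _ _
      have hne : (l.map (fun p => pvHGet history p)).foldl min (pvHGet history p) ≠ m := by omega
      simp only [hmin]
      by_cases h2 : (l.map (fun p => pvHGet history p)).foldl min (pvHGet history p) = pvHGet history p
      · simp [h2]
        intro h
        exact absurd h (ne_of_lt h1)
      · have hb : ¬ (pvHGet history p == (l.map (fun p => pvHGet history p)).foldl min (pvHGet history p)) = true := by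
          simp only [beq_iff_eq]; omega
        simp [hne, h2, hb]
    · by_cases h2 : pvHGet history p = m
      · rw [if_neg h1, if_pos h2, ih]
        have hmin : min m (pvHGet history p) = m := by omega
        simp only [hmin]
        by_cases h3 : (l.map (fun p => pvHGet history p)).foldl min m = m
        · have hb : (pvHGet history p == (l.map (fun p => pvHGet history p)).foldl min m) = true := by
            simp only [beq_iff_eq]; omega
          simp [h3]
          exact h2
        · have hb : ¬ (pvHGet history p == (l.map (fun p => pvHGet history p)).foldl min m) = true := by
            simp only [beq_iff_eq]; omega
          simp [h3, hb]
      · rw [if_neg h1, if_neg h2, ih]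
        have hmin : min m (pvHGet history p) = m := by omega
        simp only [hmin]
        have hle : (l.map (fun p => pvHGet history p)).foldl min m ≤ m :=
          foldl_min_le _ _
        have hb : ¬ (pvHGet history p == (l.map (fun p => pvHGet history p)).foldl min m) = true := by
          simp only [beq_iff_eq]; omega
        simp [hb]

-- ===== VERDICT (by name: the statement is the Claim_ definition above) =====
theorem find_minimum_pairs_py_spec : Claim_equal_find_minimum_pairs_py := by
  intro history pairs_with_dev _ _
  unfold Spec_find_minimum_pairs_py find_minimum_pairs_py find_minimum_pairs_py_alt
  rw [fmp_loop]
  by_cases h : (pairs_with_dev.map (fun p => pvHGet history p)).foldl min 999999 = 999999 <;> simp [h]
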